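-- pv_equiv track=rewrite | github.com/BaoBao666888/Novel-Downloader5 | rename_chapters/app/core/translator.py | _normalize_straight_quote_pairs
-- ===== SOURCE A (Python) =====
-- import unicodedata
--
-- def _is_wordish_char(ch: str) -> bool:
--     if not ch:
--         return False
--     try:
--         return unicodedata.category(ch)[0] in {"L", "N", "M"}
--     except Exception:
--         return False
--
-- def _normalize_straight_quote_pairs(text: str) -> str:
--     if not text:
--         return ""
--     result: list[str] = []
--     inside_quote = False
--     i = 0
--     n = len(text)
--     while i < n:
--         ch = text[i]
--         if ch != '"':
--             result.append(ch)
--             i += 1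
--             continue
--         if not inside_quote:
--             prev = result[-1] if result else ""
--             if prev and not (prev.isspace() or prev in "([{"):
--                 result.append(" ")
--             result.append('"')
--             i += 1
--             while i < n and text[i] in " \t\f\v":
--                 i += 1
--             inside_quote = True
--             continue
--         while result and result[-1] in " \t\f\v":
--             result.pop()
--         result.append('"')
--         i += 1
--         while i < n and text[i] in " \t\f\v":
--             i += 1
--         if i < n and _is_wordish_char(text[i]):
--             result.append(" ")
--         inside_quote = False
--     return "".join(result)
-- ===== SOURCE B (Python) =====
-- import unicodedata
--
-- _WS = " \t\f\v"
--
--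
-- def _is_wordish_char(ch: str) -> bool:
--     if not ch:
--         return False
--     try:
--         return unicodedata.category(ch)[0] in {"L", "N", "M"}
--     except Exception:
--         return False
--
--
-- def _normalize_straight_quote_pairs(text: str) -> str:
--     # Segment-based rewrite: split on '"'; quotes alternate open/close.
--     parts = text.split('"')
--     if len(parts) == 1:
--         return text
--     out = parts[0]
--     inner = False
--     for seg in parts[1:]:
--         if not inner:
--             # opening quote: pad with a space unless preceded by ws or ([{
--             if out and not (out[-1].isspace() or out[-1] in "([{"):
--                 out += " "
--             out += '"' + seg.lstrip(_WS)
--         else: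
--             # closing quote: trim inner trailing ws, pad after if wordish follows
--             rest = seg.lstrip(_WS)
--             out = out.rstrip(_WS) + '"'
--             if rest and _is_wordish_char(rest[0]):
--                 out += " "
--             out += rest
--         inner = not inner
--     return out
-- ===== Notes on version B (the rewrite author's own statement) =====
-- stated objective: faster
-- what changed: Replaces A's index-driven char-by-char state machine (with inner skip/pop loops) by a split on the double-quote character followed by a single fold over the segments, lstrip/rstrip-ing segment edges and padding at the quote boundaries.
import Mathlib
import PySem

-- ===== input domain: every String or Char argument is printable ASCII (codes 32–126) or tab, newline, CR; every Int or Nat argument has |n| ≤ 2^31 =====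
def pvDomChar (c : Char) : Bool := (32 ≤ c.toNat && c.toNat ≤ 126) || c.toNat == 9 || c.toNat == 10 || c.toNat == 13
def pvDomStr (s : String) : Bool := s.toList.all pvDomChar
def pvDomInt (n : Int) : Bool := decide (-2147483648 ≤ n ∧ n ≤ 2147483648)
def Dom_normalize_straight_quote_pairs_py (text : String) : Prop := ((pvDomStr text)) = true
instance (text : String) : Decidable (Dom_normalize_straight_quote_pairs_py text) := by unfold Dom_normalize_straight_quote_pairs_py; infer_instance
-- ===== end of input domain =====

-- B replaces A's char-by-char state machine by a fold over the quote-split segments (same O(n); measurably faster in Python via bulk str operations).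


-- ===== PORT A =====
-- shared module helper _is_wordish_char: on the ASCII domain, unicodedata category L/N/M ↔ ASCII letter or digit (exact on Dom)
def pvWordish (c : Char) : Bool := c.isAlpha || c.isDigit

-- the whitespace set " \t\f\v" used by the skip/pop loops
def pvWs (c : Char) : Bool := c = ' ' || c = '\t' || c = '\x0c' || c = '\x0b'

-- prev = result[-1] if result else ""; if prev and not (prev.isspace() or prev in "([{"): append " "
def pvPrevPad (res : List Char) : List Char :=
  match res with
  | [] => res
  | p :: _ => if PySem.Chars.isspace p || (p = '(' || p = '[' || p = '{') then res else ' ' :: res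

-- A's while loop; `res` is the result list kept in reverse (append = cons, pop = tail)
def pvALoop : List Char → List Char → Bool → List Char
  | [], res, _ => res
  | c :: rest, res, inside =>
    if c ≠ '"' then pvALoop rest (c :: res) inside
    else if inside = false then
      pvALoop (rest.dropWhile pvWs) ('"' :: pvPrevPad res) true
    else
      -- pop trailing ws, append '"', skip input ws, pad if a wordish char follows
      let res1 := '"' :: res.dropWhile pvWs
      let rest1 := rest.dropWhile pvWs
      let res2 := match rest1 with
        | [] => res1
        | d :: _ => if pvWordish d then ' ' :: res1 else res1
      pvALoop rest1 res2 false
  termination_by cs _ _ => cs.length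
  decreasing_by
  · simp
  · have := List.length_dropWhile_le pvWs rest; simp; omega
  · have := List.length_dropWhile_le pvWs rest; simp; omega

def normalize_straight_quote_pairs_py (text : String) : String :=
  if text = "" then "" else String.ofList ((pvALoop text.toList [] false).reverse)

-- ===== PORT B =====
-- text.split('"') for the one-char separator
def pvSplit : List Char → List (List Char)
  | [] => [[]]
  | c :: rest =>
    if c = '"' then [] :: pvSplit rest
    else
      match pvSplit rest with
      | [] => [[c]]          -- unreachable: pvSplit never returns []
      | s :: ss => (c :: s) :: ss

-- opening-quote padding: space unless the output ends in whitespace or "([{"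
def pvOpenPad (out : List Char) : List Char :=
  match out.getLast? with
  | none => out
  | some p => if PySem.Chars.isspace p || (p = '(' || p = '[' || p = '{') then out else out ++ [' ']

-- one segment step of B's fold; the Bool is `inner`
def pvBStep (st : List Char × Bool) (seg : List Char) : List Char × Bool :=
  if st.2 = false then
    (pvOpenPad st.1 ++ '"' :: seg.dropWhile pvWs, true)
  else
    let r := seg.dropWhile pvWs
    let out1 := (st.1.reverse.dropWhile pvWs).reverse ++ ['"']
    let out2 := match r with
      | [] => out1
      | d :: _ => if pvWordish d then out1 ++ [' '] else out1
    (out2 ++ r, false)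

def normalize_straight_quote_pairs_py_alt (text : String) : String :=
  match pvSplit text.toList with
  | [] => text               -- unreachable
  | [_] => text
  | p0 :: rest => String.ofList ((rest.foldl pvBStep (p0, false)).1)

-- ===== PRECONDITION & SPEC =====
def Spec_normalize_straight_quote_pairs_py (text : String) (out : String) : Prop := out = normalize_straight_quote_pairs_py_alt text
instance (text : String) (out : String) : Decidable (Spec_normalize_straight_quote_pairs_py text out) := by unfold Spec_normalize_straight_quote_pairs_py; infer_instance

-- ===== CLAIM (what is proved, stated in full; the proofs are below) =====
def Claim_equal_normalize_straight_quote_pairs_py : Prop := ∀ (text : String), Dom_normalize_straight_quote_pairs_py text → Spec_normalize_straight_quote_pairs_py text (normalize_straight_quote_pairs_py text)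

-- ===== LEMMAS AND PROOFS =====
-- the chars of the segments after parts[0], each preceded by its '"'
def pvJoin (segs : List (List Char)) : List Char := (segs.map (fun s => '"' :: s)).flatten

theorem pvJoin_cons (s : List Char) (segs : List (List Char)) :
    pvJoin (s :: segs) = '"' :: (s ++ pvJoin segs) := by simp [pvJoin]

theorem pvJoin_dropWhile (segs : List (List Char)) : (pvJoin segs).dropWhile pvWs = pvJoin segs := by
  cases segs with
  | nil => rfl
  | cons s ss => rw [pvJoin_cons]; simp [pvWs]

theorem pvDrop_append (s t : List Char) (ht : t.dropWhile pvWs = t) :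
    (s ++ t).dropWhile pvWs = s.dropWhile pvWs ++ t := by
  rw [List.dropWhile_append]
  by_cases h : (s.dropWhile pvWs).isEmpty
  · simp [h, ht]
    exact fun x hx => (List.dropWhile_eq_nil_iff.mp (List.isEmpty_iff.mp h)) x hx
  · simp [h]

-- equation lemmas for pvALoop
theorem pvALoop_nil (res : List Char) (ins : Bool) : pvALoop [] res ins = res := by
  rw [pvALoop.eq_def]

theorem pvALoop_cons_ne (c : Char) (rest res : List Char) (ins : Bool) (hc : c ≠ '"') :
    pvALoop (c :: rest) res ins = pvALoop rest (c :: res) ins := by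
  rw [pvALoop.eq_def]; simp [hc]

theorem pvALoop_open (rest res : List Char) :
    pvALoop ('"' :: rest) res false =
      pvALoop (rest.dropWhile pvWs) ('"' :: pvPrevPad res) true := by
  rw [pvALoop.eq_def]; simp

theorem pvALoop_close (rest res : List Char) :
    pvALoop ('"' :: rest) res true =
      pvALoop (rest.dropWhile pvWs)
        (match rest.dropWhile pvWs with
         | [] => '"' :: res.dropWhile pvWs
         | d :: _ => if pvWordish d then ' ' :: '"' :: res.dropWhile pvWs
                     else '"' :: res.dropWhile pvWs) false := by
  rw [pvALoop.eq_def]; simp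

-- A passes quote-free chars straight into the accumulator
theorem pvALoop_pass (t : List Char) (ht : '"' ∉ t) (u res : List Char) (ins : Bool) :
    pvALoop (t ++ u) res ins = pvALoop u (t.reverse ++ res) ins := by
  induction t generalizing res with
  | nil => simp
  | cons c t' ih =>
    have hc : c ≠ '"' := fun h => ht (h ▸ List.mem_cons_self ..)
    rw [List.cons_append, pvALoop_cons_ne _ _ _ _ hc, ih (fun h => ht (List.mem_cons_of_mem _ h))]
    simp

theorem pvPrevPad_reverse (res : List Char) : (pvPrevPad res).reverse = pvOpenPad res.reverse := by
  cases res with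
  | nil => rfl
  | cons p res' =>
    simp only [pvPrevPad, pvOpenPad, List.getLast?_reverse, List.head?_cons]
    split_ifs <;> simp

-- main simulation: A's loop over the joined tail ≡ B's fold over the segments
theorem pvMain (segs : List (List Char)) (hq : ∀ s ∈ segs, '"' ∉ s) (res : List Char) (ins : Bool) :
    pvALoop (pvJoin segs) res ins = ((segs.foldl pvBStep (res.reverse, ins)).1).reverse := by
  induction segs generalizing res ins with
  | nil => simp [pvJoin, pvALoop_nil]
  | cons s segs' ih =>
    have hs : '"' ∉ s := hq s (List.mem_cons_self ..)
    have hq' : ∀ x ∈ segs', '"' ∉ x := fun x hx => hq x (List.mem_cons_of_mem _ hx)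
    have hsd : '"' ∉ s.dropWhile pvWs := fun h => hs ((List.dropWhile_sublist _).subset h)
    have hdrop : (s ++ pvJoin segs').dropWhile pvWs = s.dropWhile pvWs ++ pvJoin segs' :=
      pvDrop_append _ _ (pvJoin_dropWhile segs')
    rw [pvJoin_cons, List.foldl_cons]
    cases ins with
    | false =>
      rw [pvALoop_open, hdrop, pvALoop_pass _ hsd, ih hq']
      congr 2
      simp [pvBStep, pvPrevPad_reverse]
    | true =>
      rw [pvALoop_close, hdrop]
      have hB : pvBStep (res.reverse, true) s =
          ((match s.dropWhile pvWs with
            | [] => (res.dropWhile pvWs).reverse ++ ['"']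
            | d :: _ => if pvWordish d then (res.dropWhile pvWs).reverse ++ ['"'] ++ [' ']
                        else (res.dropWhile pvWs).reverse ++ ['"']) ++ s.dropWhile pvWs, false) := by
        simp only [pvBStep, List.reverse_reverse]
        split <;> simp_all
      cases hsw : s.dropWhile pvWs with
      | nil =>
        simp only [List.nil_append]
        cases segs' with
        | nil =>
          simp only [pvJoin, List.map_nil, List.flatten_nil]
          rw [pvALoop_nil, List.foldl_nil, hB]
          simp [hsw]
        | cons s2 ss2 =>
          rw [pvJoin_cons]
          have : pvWordish '"' = false := by decide
          simp only [this, Bool.false_eq_true, if_false]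
          rw [← pvJoin_cons, ih hq', hB]
          simp [hsw]

      | cons d tl =>
        rw [pvALoop_pass _ (hsw ▸ hsd), ih hq', hB]
        congr 2
        simp only [hsw, List.cons_append]
        split_ifs <;> simp
-- piece decomposition of pvSplit
theorem pvSplit_ne_nil (cs : List Char) : pvSplit cs ≠ [] := by
  cases cs with
  | nil => simp [pvSplit]
  | cons c rest =>
    simp only [pvSplit]
    split_ifs
    · simp
    · split <;> simp

theorem pvSplit_spec (cs : List Char) :
    ∀ p0 rest, pvSplit cs = p0 :: rest →
      cs = p0 ++ pvJoin rest ∧ '"' ∉ p0 ∧ ∀ s ∈ rest, '"' ∉ s := by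
  induction cs with
  | nil => intro p0 rest h; simp [pvSplit] at h; simp [h.1, h.2, pvJoin]
  | cons c cs' ih =>
    intro p0 rest h
    by_cases hc : c = '"'
    · simp only [pvSplit, hc] at h
      obtain ⟨rfl, rfl⟩ := List.cons.inj h
      obtain ⟨q0, qrest, hq⟩ : ∃ q0 qrest, pvSplit cs' = q0 :: qrest := by
        cases h' : pvSplit cs' with
        | nil => exact absurd h' (pvSplit_ne_nil cs')
        | cons a b => exact ⟨a, b, rfl⟩
      obtain ⟨hjoin, hfree0, hfree⟩ := ih q0 qrest hq
      refine ⟨?_, by simp, ?_⟩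
      · rw [hq, pvJoin_cons, hc, ← hjoin]; simp
      · intro s hsmem
        rw [hq] at hsmem
        rcases List.mem_cons.mp hsmem with h1 | h1
        · exact h1 ▸ hfree0
        · exact hfree s h1
    · obtain ⟨q0, qrest, hq⟩ : ∃ q0 qrest, pvSplit cs' = q0 :: qrest := by
        cases h' : pvSplit cs' with
        | nil => exact absurd h' (pvSplit_ne_nil cs')
        | cons a b => exact ⟨a, b, rfl⟩
      simp only [pvSplit, hc, if_false, hq] at h
      obtain ⟨rfl, rfl⟩ := List.cons.inj h
      obtain ⟨hjoin, hfree0, hfree⟩ := ih q0 qrest hq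
      refine ⟨by rw [hjoin]; simp, ?_, hfree⟩
      intro hmem
      rcases List.mem_cons.mp hmem with h1 | h1
      · exact hc h1.symm
      · exact hfree0 h1

-- ===== VERDICT (by name: the statement is the Claim_ definition above) =====
theorem normalize_straight_quote_pairs_py_spec : Claim_equal_normalize_straight_quote_pairs_py := by
  intro text _
  unfold Spec_normalize_straight_quote_pairs_py
  unfold normalize_straight_quote_pairs_py normalize_straight_quote_pairs_py_alt
  obtain ⟨p0, rest, hsplit⟩ : ∃ p0 rest, pvSplit text.toList = p0 :: rest := by
    cases h' : pvSplit text.toList with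
    | nil => exact absurd h' (pvSplit_ne_nil _)
    | cons a b => exact ⟨a, b, rfl⟩
  obtain ⟨hjoin, hfree0, hfree⟩ := pvSplit_spec _ p0 rest hsplit
  rw [hsplit]
  cases rest with
  | nil =>
    simp only
    by_cases he : text = ""
    · simp [he]
    · rw [if_neg he]
      have hcs : text.toList = p0 := by simpa [pvJoin] using hjoin
      have : pvALoop text.toList [] false = text.toList.reverse := by
        rw [hcs, ← List.append_nil p0, pvALoop_pass _ hfree0, pvALoop_nil]
        simp
      rw [this]
      simp
  | cons s rest' =>
    simp only
    have hne : text ≠ "" := by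
      intro he
      rw [he] at hjoin
      have : ('"' : Char) ∈ ("" : String).toList := by
        rw [hjoin]
        rw [pvJoin_cons]
        simp
      simp at this
    rw [if_neg hne]
    rw [hjoin, pvALoop_pass _ hfree0, pvMain _ hfree]
    simp
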